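-- pv_equiv track=rewrite | github.com/ann-yachen/week-2 | week-2_optional_py.py | maxZeros
-- ===== SOURCE A (Python) =====
-- def maxZeros(nums):
--     max_length = 0
--     for i in range(0, len(nums)):
--         length = 0
--         for j in range(i, len(nums)):
--             if nums[j] == 0:
--                 length += 1
--             else:
--                 break
--         if length > max_length:
--             max_length = length
--     return max_length
-- ===== SOURCE B (Python) =====
-- def maxZeros(nums):
--     best = 0
--     cur = 0
--     for x in nums:
--         if x == 0:
--             cur += 1
--             best = max(best, cur)
--         else:
--             cur = 0
--     return best
-- ===== Notes on version B (the rewrite author's own statement) =====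
-- stated objective: alternative
-- what changed: Replaced the nested rescan (for each start index, count zeros until a nonzero) by a single pass keeping the current consecutive-zero count and the best seen, reset on a nonzero.
import Mathlib
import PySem

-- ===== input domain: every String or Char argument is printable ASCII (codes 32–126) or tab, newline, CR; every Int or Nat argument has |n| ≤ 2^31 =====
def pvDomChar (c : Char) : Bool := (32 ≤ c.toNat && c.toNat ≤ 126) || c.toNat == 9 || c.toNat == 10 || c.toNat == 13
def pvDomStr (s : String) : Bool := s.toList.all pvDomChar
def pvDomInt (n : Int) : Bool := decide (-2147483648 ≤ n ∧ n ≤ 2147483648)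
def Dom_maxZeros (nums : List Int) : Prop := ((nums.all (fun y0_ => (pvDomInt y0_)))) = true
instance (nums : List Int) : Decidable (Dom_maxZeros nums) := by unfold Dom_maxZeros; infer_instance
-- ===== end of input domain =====

-- B is a single pass (current run / best so far) instead of A's rescan from every start index; return values proved equal.

-- ===== PORT A =====
-- inner loop of A: starting at index i (here: at a suffix), count zeros until a nonzero breaks
def innerA : List Int → Int
  | [] => 0
  | x :: xs => if x = 0 then innerA xs + 1 else 0

-- outer loop of A over i = 0 .. len-1, i.e. over the suffixes, carrying max_length
def outerA : List Int → Int → Int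
  | [], m => m
  | x :: xs, m =>
      let length := innerA (x :: xs)
      outerA xs (if length > m then length else m)

def maxZeros (nums : List Int) : Int := outerA nums 0

-- ===== PORT B =====
-- one step of B's single pass: state (best, cur)
def stepB (s : Int × Int) (x : Int) : Int × Int :=
  if x = 0 then (max s.1 (s.2 + 1), s.2 + 1) else (s.1, 0)

def maxZeros_alt (nums : List Int) : Int := (nums.foldl stepB (0, 0)).1

-- ===== PRECONDITION & SPEC =====
def Spec_maxZeros (nums : List Int) (out : Int) : Prop := out = maxZeros_alt nums
instance (nums : List Int) (out : Int) : Decidable (Spec_maxZeros nums out) := by unfold Spec_maxZeros; infer_instance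

-- ===== CLAIM (what is proved, stated in full; the proofs are below) =====
def Claim_equal_maxZeros : Prop := ∀ (nums : List Int), Dom_maxZeros nums → Spec_maxZeros nums (maxZeros nums)

-- ===== LEMMAS AND PROOFS =====

-- max over all suffixes of their leading-zero count
def bestA : List Int → Int
  | [] => 0
  | x :: xs => max (innerA (x :: xs)) (bestA xs)

theorem innerA_nonneg (l : List Int) : 0 ≤ innerA l := by
  induction l with
  | nil => simp [innerA]
  | cons x xs ih => simp only [innerA]; split <;> omega

theorem bestA_nonneg (l : List Int) : 0 ≤ bestA l := by
  cases l with
  | nil => simp [bestA]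
  | cons x xs => simp only [bestA]; exact le_max_of_le_left (innerA_nonneg _)

theorem innerA_le_bestA (l : List Int) : innerA l ≤ bestA l := by
  cases l with
  | nil => simp [bestA, innerA]
  | cons x xs => exact le_max_left _ _

theorem outerA_eq (l : List Int) : ∀ m : Int, 0 ≤ m → outerA l m = max m (bestA l) := by
  induction l with
  | nil => intro m hm; simp [outerA, bestA]; omega
  | cons x xs ih =>
      intro m hm
      simp only [outerA, bestA]
      have : (if innerA (x :: xs) > m then innerA (x :: xs) else m)
          = max m (innerA (x :: xs)) := by split <;> omega
      rw [this, ih _ (by omega)]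
      omega

theorem foldB_eq (l : List Int) : ∀ b c : Int, 0 ≤ c → c ≤ b →
    (l.foldl stepB (b, c)).1 = max b (max (c + innerA l) (bestA l)) := by
  induction l with
  | nil =>
      intro b c hc hcb
      simp only [List.foldl, innerA, bestA]
      omega
  | cons x xs ih =>
      intro b c hc hcb
      by_cases hx : x = 0
      · have h1 : 0 ≤ innerA xs := innerA_nonneg xs
        subst hx
        simp only [List.foldl, stepB, innerA, bestA, if_true]
        rw [ih (max b (c + 1)) (c + 1) (by omega) (by omega)]
        omega
      · have h2 : innerA xs ≤ bestA xs := innerA_le_bestA xs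
        have h3 : 0 ≤ bestA xs := bestA_nonneg xs
        simp only [List.foldl, stepB, if_neg hx, innerA, bestA]
        rw [ih b 0 le_rfl (by omega)]
        omega

-- ===== VERDICT (by name: the statement is the Claim_ definition above) =====
theorem maxZeros_spec : Claim_equal_maxZeros := by
  intro nums _
  show maxZeros nums = maxZeros_alt nums
  have h1 : innerA nums ≤ bestA nums := innerA_le_bestA nums
  have h2 : 0 ≤ bestA nums := bestA_nonneg nums
  unfold maxZeros maxZeros_alt
  rw [outerA_eq nums 0 le_rfl, foldB_eq nums 0 0 le_rfl le_rfl]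
  omega
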